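-- pv_equiv track=rewrite | github.com/Said-Alisic/BinaryGapPy3 | solution.py | check_gap
-- ===== SOURCE A (Python) =====
-- def check_gap(binary):
--
--
--     gap = 0         # Gap between first 1 and the next 1 in a binary num
--     final_gap = 0   # The largest found gap
--
--     # Checks if the number 1 has been found to start incrementing the gap number
--     # this way, in the case of '00000101' we should get a gap of only 1
--     start_increment = False
--
--     # Loop over binary number
--     for bit in binary:
--
--         if bit == '1' and start_increment == False:
--             start_increment = True
--
--         elif bit == '0' and start_increment == True:
--             gap += 1
--
--         elif bit == '1':
--             if final_gap < gap:
--                 final_gap = gap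
--             gap = 0
--
--     # Parse binary to integer to avoid unpredictable errors
--     return int(final_gap)
-- ===== SOURCE B (Python) =====
-- def check_gap(binary):
--     parts = binary.split('1')
--     return max((p.count('0') for p in parts[1:-1]), default=0)
-- ===== Notes on version B (the rewrite author's own statement) =====
-- stated objective: faster
-- what changed: A's per-character scan with a (gap, final_gap, started) state machine is replaced by splitting the string at the one-bits and taking the max (default 0) of the zero-counts of the inner segments parts[1:-1].
import Mathlib
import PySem

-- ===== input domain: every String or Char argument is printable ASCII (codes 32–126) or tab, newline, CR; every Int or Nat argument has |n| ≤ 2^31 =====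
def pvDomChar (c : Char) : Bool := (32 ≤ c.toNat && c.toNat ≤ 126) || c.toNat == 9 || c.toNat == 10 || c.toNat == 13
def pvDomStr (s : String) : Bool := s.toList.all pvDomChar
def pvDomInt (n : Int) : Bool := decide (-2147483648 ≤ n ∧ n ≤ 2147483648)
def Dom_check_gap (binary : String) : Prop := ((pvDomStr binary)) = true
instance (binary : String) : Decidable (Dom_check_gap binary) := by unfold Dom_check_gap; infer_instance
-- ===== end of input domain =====

-- B replaces A's three-flag character scan with a split('1') and a max over the inner segments' zero-counts (objective: faster, measured constant-factor).

-- ===== PORT A =====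
-- the body of A's for-loop: state (gap, final_gap, start_increment), branches in A's order
def pvStepA (st : Int × Int × Bool) (bit : Char) : Int × Int × Bool :=
  if bit = '1' ∧ st.2.2 = false then (st.1, st.2.1, true)
  else if bit = '0' ∧ st.2.2 = true then (st.1 + 1, st.2.1, st.2.2)
  else if bit = '1' then (0, (if st.2.1 < st.1 then st.1 else st.2.1), st.2.2)
  else st

-- literal port of A: fold the loop body over the characters, return final_gap
def check_gap (binary : String) : Int :=
  (binary.toList.foldl pvStepA (0, 0, false)).2.1

-- ===== PORT B =====
-- literal port of Source B: parts = binary.split('1'); max of p.count('0') over parts[1:-1], default 0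
def check_gap_alt (binary : String) : Int :=
  PySem.List.maxD
    ((PySem.List.slice (PySem.Chars.splitOn binary.toList ['1']) (some 1) (some (-1))).map
      (fun p => (PySem.Chars.count p ['0'] : Int)))
    (fun x => x) 0

-- ===== PRECONDITION & SPEC =====
def Spec_check_gap (binary : String) (out : Int) : Prop := out = check_gap_alt binary
instance (binary : String) (out : Int) : Decidable (Spec_check_gap binary out) := by unfold Spec_check_gap; infer_instance

-- ===== CLAIM (what is proved, stated in full; the proofs are below) =====
def Claim_equal_check_gap : Prop := ∀ (binary : String), Dom_check_gap binary → Spec_check_gap binary (check_gap binary)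

-- ===== LEMMAS AND PROOFS =====

-- structural model of splitting on '1' (cur is the reversed current segment)
def pvSplit1 : List Char → List Char → List (List Char)
  | [], cur => [cur.reverse]
  | c :: r, cur => if c = '1' then cur.reverse :: pvSplit1 r [] else pvSplit1 r (c :: cur)

-- structural model of A's loop once start_increment is true
def pvRunT : List Char → Int → Int → Int × Int
  | [], g, f => (g, f)
  | c :: r, g, f =>
    if c = '1' then pvRunT r 0 (if f < g then g else f)
    else if c = '0' then pvRunT r (g + 1) f
    else pvRunT r g f

theorem pvSplit1_ne_nil (r cur : List Char) : pvSplit1 r cur ≠ [] := by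
  induction r generalizing cur with
  | nil => simp [pvSplit1]
  | cons c r ih => by_cases h : c = '1' <;> simp [pvSplit1, h, ih]

theorem splitOn_go_eq (fuel : Nat) (l cur : List Char) (acc : List (List Char))
    (h : l.length < fuel) :
    PySem.Chars.splitOn.go ['1'] fuel l cur acc = acc.reverse ++ pvSplit1 l cur := by
  induction fuel generalizing l cur acc with
  | zero => omega
  | succ fuel ih =>
    cases l with
    | nil => simp [PySem.Chars.splitOn.go, pvSplit1]
    | cons c r =>
      by_cases hc : c = '1'
      · subst hc
        rw [PySem.Chars.splitOn.go]
        rw [if_pos (show (['1'].isPrefixOf ('1' :: r)) = true by simp [List.isPrefixOf])]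
        simp only [List.length_cons, List.length_nil, List.drop_succ_cons, List.drop_zero]
        rw [ih r [] (cur.reverse :: acc) (by simp at h ⊢; omega)]
        simp [pvSplit1]
      · rw [PySem.Chars.splitOn.go]
        have hpre : (['1'].isPrefixOf (c :: r)) = false := by
          simp [List.isPrefixOf]; exact fun hh => hc hh.symm
        rw [if_neg (by simp [hpre])]
        rw [ih r (c :: cur) acc (by simp at h ⊢; omega)]
        simp [pvSplit1, hc]

theorem splitOn_eq (cs : List Char) : PySem.Chars.splitOn cs ['1'] = pvSplit1 cs [] := by
  unfold PySem.Chars.splitOn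
  rw [splitOn_go_eq (cs.length + 1) cs [] [] (by omega)]
  simp

theorem count_go_eq (fuel : Nat) (l : List Char) (acc : Nat) (h : l.length ≤ fuel) :
    PySem.Chars.count.go ['0'] fuel l acc = acc + l.count '0' := by
  induction fuel generalizing l acc with
  | zero =>
    cases l with
    | nil => simp [PySem.Chars.count.go]
    | cons c r => simp at h
  | succ fuel ih =>
    cases l with
    | nil => simp [PySem.Chars.count.go]
    | cons c r =>
      by_cases hc : c = '0'
      · subst hc
        rw [PySem.Chars.count.go]
        rw [if_pos (show (['0'].isPrefixOf ('0' :: r)) = true by simp [List.isPrefixOf])]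
        simp only [List.length_cons, List.length_nil, List.drop_succ_cons, List.drop_zero]
        rw [ih r (acc + 1) (by simp at h ⊢; omega)]
        simp
        omega
      · rw [PySem.Chars.count.go]
        have hpre : (['0'].isPrefixOf (c :: r)) = false := by
          simp [List.isPrefixOf]; exact fun hh => hc hh.symm
        rw [if_neg (by simp [hpre])]
        rw [ih r acc (by simp at h ⊢; omega)]
        simp [hc]

theorem count_eq_count (l : List Char) : PySem.Chars.count l ['0'] = l.count '0' := by
  unfold PySem.Chars.count
  simp only [List.isEmpty_cons, Bool.false_eq_true, if_false]
  rw [count_go_eq l.length l 0 (le_refl _)]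
  simp

theorem slice_mid (xs : List (List Char)) :
    PySem.List.slice xs (some 1) (some (-1)) = (xs.drop 1).dropLast := by
  simp [PySem.List.slice, PySem.List.clampIdx]
  rcases xs with _ | ⟨a, t⟩
  · simp
  · simp [List.dropLast_eq_take]

-- the master invariant: A's started-phase loop against the split segments
theorem runT_split (r : List Char) (cur : List Char) (f : Int) :
    pvRunT r (cur.count '0' : Int) f =
      ( (((pvSplit1 r cur).getLastD []).count '0' : Int),
        ((pvSplit1 r cur).dropLast).foldl
          (fun a s => if a < (s.count '0' : Int) then (s.count '0' : Int) else a) f ) := by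
  induction r generalizing cur f with
  | nil => simp [pvRunT, pvSplit1]
  | cons c r ih =>
    by_cases hc : c = '1'
    · subst hc
      have hne := pvSplit1_ne_nil r ([] : List Char)
      rw [show pvRunT ('1' :: r) (cur.count '0' : Int) f
            = pvRunT r 0 (if f < (cur.count '0' : Int) then (cur.count '0' : Int) else f) by
          simp [pvRunT]]
      rw [show (0 : Int) = (([] : List Char).count '0' : Int) by simp]
      rw [ih]
      simp only [pvSplit1, if_true]
      simp only [Prod.mk.injEq]
      constructor
      · cases hsp : pvSplit1 r [] with
        | nil => exact (hne hsp).elim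
        | cons a t => simp
      · cases hsp : pvSplit1 r [] with
        | nil => exact (hne hsp).elim
        | cons a t => simp [List.dropLast_cons_of_ne_nil]
    · by_cases h0 : c = '0'
      · subst h0
        rw [show pvRunT ('0' :: r) (cur.count '0' : Int) f
              = pvRunT r ((cur.count '0' : Int) + 1) f by simp [pvRunT]]
        rw [show ((cur.count '0' : Int) + 1) = ((('0' :: cur).count '0' : Int)) by simp]
        rw [ih]
        simp [pvSplit1]
      · rw [show pvRunT (c :: r) (cur.count '0' : Int) f
              = pvRunT r (cur.count '0' : Int) f by simp [pvRunT, hc, h0]]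
        rw [show ((cur.count '0' : Int)) = (((c :: cur).count '0' : Int)) by
          simp [h0]]
        rw [ih]
        simp [pvSplit1, hc]

-- A's fold in the started phase is pvRunT
theorem foldl_started (r : List Char) (g f : Int) :
    r.foldl pvStepA (g, f, true) = ((pvRunT r g f).1, (pvRunT r g f).2, true) := by
  induction r generalizing g f with
  | nil => simp [pvRunT]
  | cons c r ih =>
    by_cases hc : c = '1'
    · subst hc; simp only [List.foldl_cons]; simp [pvStepA, pvRunT, ih]
    · by_cases h0 : c = '0'
      · subst h0; simp only [List.foldl_cons]; simp [pvStepA, pvRunT, ih]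
      · simp only [List.foldl_cons]; simp [pvStepA, pvRunT, hc, h0, ih]

-- A's fold before the first '1' keeps the initial state
theorem foldl_unstarted (p : List Char) (hp : '1' ∉ p) :
    p.foldl pvStepA ((0 : Int), (0 : Int), false) = ((0 : Int), (0 : Int), false) := by
  induction p with
  | nil => simp
  | cons c r ih =>
    simp at hp
    have hc : ¬ (c = '1') := fun h => hp.1 h.symm
    simp only [List.foldl_cons]
    rw [show pvStepA ((0 : Int), (0 : Int), false) c = ((0 : Int), (0 : Int), false) by
      simp [pvStepA, hc]]
    exact ih hp.2

theorem pvSplit1_no_one (r cur : List Char) (h : '1' ∉ r) :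
    pvSplit1 r cur = [cur.reverse ++ r] := by
  induction r generalizing cur with
  | nil => simp [pvSplit1]
  | cons c t ih =>
    simp at h
    have hc : ¬ (c = '1') := fun hh => h.1 hh.symm
    simp [pvSplit1, hc, ih _ h.2]

theorem pvSplit1_append (p r cur : List Char) (hp : '1' ∉ p) :
    pvSplit1 (p ++ '1' :: r) cur = (cur.reverse ++ p) :: pvSplit1 r [] := by
  induction p generalizing cur with
  | nil => simp [pvSplit1]
  | cons c t ih =>
    simp at hp
    have hc : ¬ (c = '1') := fun hh => hp.1 hh.symm
    simp [pvSplit1, hc, ih _ hp.2]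

-- Python max(xs, default): maxD on a cons is the plain if-fold from the head
theorem maxD_cons : ∀ (ys : List Int) (y d : Int),
    PySem.List.maxD (y :: ys) (fun x => x) d = ys.foldl (fun a b => if a < b then b else a) y := by
  intro ys
  induction ys with
  | nil => intro y d; simp [PySem.List.maxD, PySem.List.max?]
  | cons z zs ih =>
    intro y d
    have h := ih (if y < z then z else y) d
    simp only [PySem.List.maxD, PySem.List.max?, List.foldl_cons] at h ⊢
    rw [← apply_ite Option.some]
    exact h

theorem maxD_nonneg (xs : List Int) (h : ∀ x ∈ xs, 0 ≤ x) :
    PySem.List.maxD xs (fun x => x) 0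
      = xs.foldl (fun a b => if a < b then b else a) 0 := by
  cases xs with
  | nil => simp [PySem.List.maxD, PySem.List.max?]
  | cons y ys =>
    have hy : 0 ≤ y := h y (by simp)
    rw [maxD_cons ys y 0]
    simp only [List.foldl_cons]
    congr 1
    by_cases hz : (0 : Int) < y
    · simp [hz]
    · simp [show y = 0 by omega]

-- ===== VERDICT (by name: the statement is the Claim_ definition above) =====
theorem check_gap_spec : Claim_equal_check_gap := by
  intro binary _
  unfold Spec_check_gap check_gap check_gap_alt
  rw [splitOn_eq, slice_mid]
  by_cases h1 : '1' ∈ binary.toList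
  · have hidx : (PySem.List.index? binary.toList '1').isSome := by
      rw [PySem.List.index?_isSome_iff]; exact h1
    obtain ⟨k, hk⟩ := Option.isSome_iff_exists.mp hidx
    obtain ⟨p, r, hpr, _, hp⟩ := (PySem.List.index?_eq_some_iff _ _ _).mp hk
    rw [hpr]
    rw [List.foldl_append, foldl_unstarted p hp]
    simp only [List.foldl_cons]
    rw [show pvStepA ((0 : Int), (0 : Int), false) '1' = ((0 : Int), (0 : Int), true) by
      simp [pvStepA]]
    rw [foldl_started r 0 0]
    rw [pvSplit1_append p r [] hp]
    simp only [List.drop_one, List.tail_cons]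
    have hrun := runT_split r [] 0
    simp only [List.count_nil, Nat.cast_zero] at hrun
    rw [hrun]
    rw [maxD_nonneg _ (by
      intro x hx
      simp only [List.mem_map] at hx
      obtain ⟨s, _, hs⟩ := hx
      subst hs
      positivity)]
    rw [List.foldl_map]
    simp only [count_eq_count]
  · rw [pvSplit1_no_one _ _ h1]
    rw [foldl_unstarted binary.toList h1]
    simp [PySem.List.maxD, PySem.List.max?]
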